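-- pv_equiv track=rewrite | github.com/jomujin/airflow_tutorial | dags/src/py/check_table.py | get_correct_date
-- ===== SOURCE A (Python) =====
-- def get_correct_date(date):
--     if date[:2] == '20':
--         return date
--     else:
--         date_arr = date.split('_')
--         for i, s in enumerate(date_arr):
--             if  s.startswith('20'):
--                 return '_'.join(date_arr[i:])
--     return date
-- ===== SOURCE B (Python) =====
-- def get_correct_date(date):
--     if date.startswith('20'):
--         return date
--     k = date.find('_20')
--     return date[k + 1:] if k != -1 else date
-- ===== Notes on version B (the rewrite author's own statement) =====
-- stated objective: simpler
-- what changed: Replaces the split-into-parts-and-rejoin loop with a single substring search: the first underscore-separated part with the sought prefix either starts the string or begins right after the leftmost occurrence of underscore-then-prefix, so B slices the string at that position instead of splitting and rejoining.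
import Mathlib
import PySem

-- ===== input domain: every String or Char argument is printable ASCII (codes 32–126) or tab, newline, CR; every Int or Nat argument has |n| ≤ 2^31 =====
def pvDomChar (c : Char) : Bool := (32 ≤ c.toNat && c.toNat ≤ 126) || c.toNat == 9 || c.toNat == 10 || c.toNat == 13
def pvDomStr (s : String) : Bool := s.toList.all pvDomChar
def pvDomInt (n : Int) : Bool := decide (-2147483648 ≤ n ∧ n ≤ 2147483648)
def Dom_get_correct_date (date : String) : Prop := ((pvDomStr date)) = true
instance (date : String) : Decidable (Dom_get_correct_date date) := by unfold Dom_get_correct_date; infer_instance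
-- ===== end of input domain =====

-- B replaces A's split-into-parts loop with a single leftmost search for "_20"; simpler, return value only.

-- ===== PORT A =====
-- the 'for i, s in enumerate(date_arr): if s.startswith('20'): return '_'.join(date_arr[i:])' loop;
-- none = the loop fell through without returning
def pvLoopA : List String → Option String
  | [] => none
  | s :: rest =>
    if PySem.Str.startswith s "20" then some (PySem.Str.join "_" (s :: rest))
    else pvLoopA rest

def get_correct_date (date : String) : String :=
  if PySem.Str.slice date none (some 2) == "20" then date
  else
    match PySem.Str.split? date "_" with
    | none => date   -- unreachable: the separator "_" is nonempty
    | some date_arr => (pvLoopA date_arr).getD date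

-- ===== PORT B =====
def get_correct_date_alt (date : String) : String :=
  if PySem.Str.startswith date "20" then date
  else
    let k : Int := PySem.Str.find date "_20"
    if k ≠ -1 then PySem.Str.slice date (some (k + 1)) none else date

-- ===== PRECONDITION & SPEC =====
def Spec_get_correct_date (date : String) (out : String) : Prop := out = get_correct_date_alt date
instance (date : String) (out : String) : Decidable (Spec_get_correct_date date out) := by unfold Spec_get_correct_date; infer_instance

-- ===== CLAIM (what is proved, stated in full; the proofs are below) =====
def Claim_equal_get_correct_date : Prop := ∀ (date : String), Dom_get_correct_date date → Spec_get_correct_date date (get_correct_date date)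

-- ===== LEMMAS AND PROOFS =====

-- proof-side model of date.split('_') (A's split, single-character separator)
def pvSplitC (pre : List Char) : List Char → List (List Char)
  | [] => [pre]
  | c :: rest => if c = '_' then pre :: pvSplitC [] rest else pvSplitC (pre ++ [c]) rest

-- proof-side model of A's loop on the char level
def pvLoopC : List (List Char) → Option (List Char)
  | [] => none
  | p :: rest =>
    if ['2','0'].isPrefixOf p then some (PySem.Chars.join ['_'] (p :: rest)) else pvLoopC rest

theorem pvSplitC_us (pre rest) : pvSplitC pre ('_' :: rest) = pre :: pvSplitC [] rest := by
  simp [pvSplitC]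

theorem pvSplitC_other {c : Char} (pre rest) (h : c ≠ '_') :
    pvSplitC pre (c :: rest) = pvSplitC (pre ++ [c]) rest := by
  simp [pvSplitC, h]

theorem pvLoopC_cons_pos {p : List Char} (ps) (h : ['2','0'] <+: p) :
    pvLoopC (p :: ps) = some (PySem.Chars.join ['_'] (p :: ps)) := by
  simp [pvLoopC, List.isPrefixOf_iff_prefix, h]

theorem pvLoopC_cons_neg {p : List Char} (ps) (h : ¬ ['2','0'] <+: p) :
    pvLoopC (p :: ps) = pvLoopC ps := by
  simp [pvLoopC, List.isPrefixOf_iff_prefix, h]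

theorem pvSplitOn_go_eq (fuel : Nat) : ∀ (l cur acc : List Char) (accs : List (List Char)),
    l.length < fuel →
    PySem.Chars.splitOn.go ['_'] fuel l cur accs = accs.reverse ++ pvSplitC cur.reverse l := by
  induction fuel with
  | zero => intro l cur acc accs h; omega
  | succ fuel ih =>
    intro l cur acc accs h
    cases l with
    | nil => simp [PySem.Chars.splitOn.go, pvSplitC]
    | cons c rest =>
      by_cases hc : c = '_'
      · subst hc
        rw [show PySem.Chars.splitOn.go ['_'] (fuel+1) ('_'::rest) cur accs
              = PySem.Chars.splitOn.go ['_'] fuel rest [] (cur.reverse :: accs) by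
            simp [PySem.Chars.splitOn.go, List.isPrefixOf]]
        rw [ih rest [] acc (cur.reverse :: accs) (by simpa using h)]
        simp [pvSplitC]
      · rw [show PySem.Chars.splitOn.go ['_'] (fuel+1) (c::rest) cur accs
              = PySem.Chars.splitOn.go ['_'] fuel rest (c :: cur) accs by
            have hnp : List.isPrefixOf ['_'] (c :: rest) = false := by
              simp [List.isPrefixOf]; exact fun h => hc h.symm
            simp [PySem.Chars.splitOn.go, hnp]]
        rw [ih rest (c :: cur) acc accs (by simpa using h)]
        simp [pvSplitC, hc]

theorem pvSplitOn_eq (cs : List Char) : PySem.Chars.splitOn cs ['_'] = pvSplitC [] cs := by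
  rw [PySem.Chars.splitOn, pvSplitOn_go_eq (cs.length + 1) cs [] [] [] (Nat.lt_succ_self _)]
  simp

theorem pvJoin_cons_cons (s x y : List Char) (ys : List (List Char)) :
    PySem.Chars.join s (x :: y :: ys) = x ++ s ++ PySem.Chars.join s (y :: ys) := by
  simp [PySem.Chars.join, List.intercalate, List.intersperse]

theorem pvSplitC_ne_nil : ∀ (cs : List Char) (pre : List Char), pvSplitC pre cs ≠ [] := by
  intro cs
  induction cs with
  | nil => intro pre; simp [pvSplitC]
  | cons c rest ih =>
    intro pre
    by_cases hc : c = '_' <;> simp [pvSplitC, hc, ih]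

theorem pvJoin_pvSplitC : ∀ (cs : List Char) (pre : List Char),
    PySem.Chars.join ['_'] (pvSplitC pre cs) = pre ++ cs := by
  intro cs
  induction cs with
  | nil =>
    intro pre
    rw [show pvSplitC pre [] = [pre] from rfl]
    simp [PySem.Chars.join, List.intercalate]
  | cons c rest ih =>
    intro pre
    by_cases hc : c = '_'
    · subst hc
      rw [pvSplitC_us]
      obtain ⟨y, ys, hy⟩ := List.exists_cons_of_ne_nil (pvSplitC_ne_nil rest [])
      rw [hy, pvJoin_cons_cons, ← hy, ih []]
      simp
    · rw [pvSplitC_other pre rest hc, ih (pre ++ [c])]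
      simp

-- if the string (past the already-read prefix of the current part) starts with "20",
-- A's loop fires on the first part and rejoins everything
theorem pvLoopC_hit : ∀ (cs pre : List Char), ['2','0'] <+: pre ++ cs →
    pvLoopC (pvSplitC pre cs) = some (pre ++ cs) := by
  intro cs
  induction cs with
  | nil =>
    intro pre h
    simp only [List.append_nil] at h
    simp [pvSplitC, pvLoopC, List.isPrefixOf_iff_prefix, h, PySem.Chars.join, List.intercalate]
  | cons c rest ih =>
    intro pre h
    by_cases hc : c = '_'
    · subst hc
      have hpre : ['2','0'] <+: pre := by
        obtain ⟨t, ht⟩ := h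
        match pre, ht with
        | [], ht => simp at ht
        | [a], ht => simp at ht
        | a :: b :: pre', ht =>
          simp only [List.cons_append, List.cons.injEq] at ht
          exact ⟨pre', by simp [← ht.1, ← ht.2.1]⟩
      rw [pvSplitC_us, pvLoopC_cons_pos _ hpre, ← pvSplitC_us, pvJoin_pvSplitC]
    · rw [pvSplitC_other pre rest hc, ih (pre ++ [c]) (by simpa using h)]
      simp

-- if no part starts with "20", A's loop falls through
theorem pvLoopC_miss : ∀ (cs pre : List Char), ¬ ['2','0'] <+: pre ++ cs →
    (∀ j, ¬ ['_','2','0'] <+: cs.drop j) → pvLoopC (pvSplitC pre cs) = none := by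
  intro cs
  induction cs with
  | nil =>
    intro pre h _
    simp only [List.append_nil] at h
    simp [pvSplitC, pvLoopC, List.isPrefixOf_iff_prefix, h]
  | cons c rest ih =>
    intro pre h hocc
    by_cases hc : c = '_'
    · subst hc
      have hpre : ¬ ['2','0'] <+: pre := fun hp => h (hp.trans (List.prefix_append _ _))
      rw [pvSplitC_us, pvLoopC_cons_neg _ hpre]
      refine ih [] ?_ ?_
      · intro hr
        have hr' : ['2','0'] <+: rest := by simpa using hr
        exact hocc 0 (by rw [List.drop_zero]; exact (List.cons_prefix_cons).mpr ⟨rfl, hr'⟩)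
      · intro j; simpa using hocc (j + 1)
    · rw [pvSplitC_other pre rest hc]
      refine ih (pre ++ [c]) (by simpa using h) ?_
      intro j; simpa using hocc (j + 1)

-- the first part starting with "20" begins right after the leftmost "_20" occurrence
theorem pvLoopC_find : ∀ (cs pre : List Char) (k : Nat),
    ¬ ['2','0'] <+: pre ++ cs →
    ['_','2','0'] <+: cs.drop k →
    (∀ i < k, ¬ ['_','2','0'] <+: cs.drop i) →
    pvLoopC (pvSplitC pre cs) = some (cs.drop (k + 1)) := by
  intro cs
  induction cs with
  | nil =>
    intro pre k _ h2 _
    simp at h2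
  | cons c rest ih =>
    intro pre k h h2 h3
    by_cases hc : c = '_'
    · subst hc
      have hpre : ¬ ['2','0'] <+: pre := fun hp => h (hp.trans (List.prefix_append _ _))
      rw [pvSplitC_us, pvLoopC_cons_neg _ hpre]
      cases k with
      | zero =>
        have h20 : ['2','0'] <+: rest := by
          simp only [List.drop_zero] at h2
          obtain ⟨t, ht⟩ := h2
          simp only [List.cons_append, List.cons.injEq] at ht
          exact ⟨t, ht.2⟩
        rw [pvLoopC_hit rest [] (by simpa using h20)]
        simp
      | succ k =>
        refine (ih [] k ?_ ?_ ?_).trans (by simp)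
        · intro hr
          have hr' : ['2','0'] <+: rest := by simpa using hr
          exact h3 0 (Nat.succ_pos k) (by rw [List.drop_zero]; exact (List.cons_prefix_cons).mpr ⟨rfl, hr'⟩)
        · simpa using h2
        · intro i hi; simpa using h3 (i + 1) (by omega)
    · cases k with
      | zero =>
        exfalso
        simp only [List.drop_zero] at h2
        obtain ⟨t, ht⟩ := h2
        simp only [List.cons_append, List.cons.injEq] at ht
        exact hc ht.1.symm
      | succ k =>
        rw [pvSplitC_other pre rest hc]
        refine (ih (pre ++ [c]) k (by simpa using h) (by simpa using h2) ?_).trans (by simp)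
        intro i hi; simpa using h3 (i + 1) (by omega)

-- bridge between A's loop on Strings and its char-level model
theorem pvLoopA_eq : ∀ (parts : List (List Char)),
    pvLoopA (parts.map String.ofList) = (pvLoopC parts).map String.ofList := by
  intro parts
  induction parts with
  | nil => simp [pvLoopA, pvLoopC]
  | cons p rest ih =>
    have hsw : PySem.Chars.startswith p ['2','0'] = List.isPrefixOf ['2','0'] p := rfl
    have hj : PySem.Str.join "_" (String.ofList p :: List.map String.ofList rest)
        = String.ofList (PySem.Chars.join ['_'] (p :: rest)) := by
      simp [PySem.Str.join, List.map_map, Function.comp_def]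
    by_cases hp : List.isPrefixOf ['2','0'] p
    · simp [pvLoopA, pvLoopC, hsw, hp, hj]
    · simp [pvLoopA, pvLoopC, hsw, hp, ih]


theorem pv_ofList_toList (s : String) : String.ofList s.toList = s := by
  simp

theorem pv_main (date : String) : get_correct_date date = get_correct_date_alt date := by
  unfold get_correct_date get_correct_date_alt
  by_cases hp : ['2','0'] <+: date.toList
  · have h1 : (PySem.Str.slice date none (some 2) == "20") = true := by
      rw [beq_iff_eq, ← pv_ofList_toList (PySem.Str.slice date none (some 2)),
        PySem.Str.toList_slice, PySem.Chars.slice_eq_listSlice,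
        PySem.List.slice_to date.toList (b := 2) (by norm_num)]
      have hp' : List.take 2 date.toList = ['2','0'] := by
        have h := (List.prefix_iff_eq_take.mp hp).symm
        simpa using h
      rw [show ((2:Int).toNat) = 2 from rfl, hp']
    have h2 : PySem.Str.startswith date "20" = true := by
      rw [PySem.Str.startswith_eq]
      exact (PySem.Chars.startswith_iff _ _).mpr hp
    simp only [h1, h2, if_true]
  · have h1 : (PySem.Str.slice date none (some 2) == "20") = false := by
      rw [beq_eq_false_iff_ne]
      intro he
      apply hp
      have hts := congrArg String.toList he
      rw [PySem.Str.toList_slice, PySem.Chars.slice_eq_listSlice,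
        PySem.List.slice_to date.toList (b := 2) (by norm_num)] at hts
      rw [show ((2:Int).toNat) = 2 from rfl] at hts
      rw [List.prefix_iff_eq_take]
      simpa using hts.symm
    have h2 : PySem.Str.startswith date "20" = false := by
      rw [PySem.Str.startswith_eq]
      simp only [Bool.eq_false_iff, ne_eq, PySem.Chars.startswith_iff]
      exact hp
    simp only [h1, h2, Bool.false_eq_true, if_false]
    have hsplit : PySem.Str.split? date "_" = some ((pvSplitC [] date.toList).map String.ofList) := by
      rw [PySem.Str.split?, PySem.Chars.split?]
      simp [pvSplitOn_eq]
    rw [hsplit]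
    have hfind : PySem.Str.find date "_20" = PySem.Chars.find date.toList ['_','2','0'] := by
      rw [PySem.Str.find_eq]; rfl
    simp only [hfind]
    by_cases hk : PySem.Chars.find date.toList ['_','2','0'] = -1
    · have hnocc : ∀ j, ¬ ['_','2','0'] <+: date.toList.drop j := by
        intro j hj
        have hinf : ['_','2','0'] <:+: date.toList :=
          hj.isInfix.trans (List.drop_suffix j date.toList).isInfix
        exact (PySem.Chars.find_eq_neg_one_iff date.toList ['_','2','0']).mp hk hinf
      rw [pvLoopA_eq, pvLoopC_miss date.toList [] (by simpa using hp) hnocc]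
      simp [hk]
    · have hk0 : 0 ≤ PySem.Chars.find date.toList ['_','2','0'] := by
        have hb := PySem.Chars.neg_one_le_find date.toList ['_','2','0']
        omega
      obtain ⟨hpref, hmin⟩ := PySem.Chars.find_spec (s := date.toList) (sub := ['_','2','0']) hk0
      rw [pvLoopA_eq,
        pvLoopC_find date.toList [] (PySem.Chars.find date.toList ['_','2','0']).toNat
          (by simpa using hp) hpref hmin]
      simp only [Option.map_some, Option.getD_some, hk, if_pos, ne_eq, not_false_iff]
      rw [← pv_ofList_toList (PySem.Str.slice date (some (PySem.Chars.find date.toList ['_','2','0'] + 1)) none),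
        PySem.Str.toList_slice]
      rw [PySem.Chars.slice_eq_listSlice,
        PySem.List.slice_from date.toList (a := PySem.Chars.find date.toList ['_','2','0'] + 1) (by omega)]
      rw [show (PySem.Chars.find date.toList ['_','2','0'] + 1).toNat
          = (PySem.Chars.find date.toList ['_','2','0']).toNat + 1 by omega]

-- ===== VERDICT (by name: the statement is the Claim_ definition above) =====
theorem get_correct_date_spec : Claim_equal_get_correct_date := by
  intro date _
  unfold Spec_get_correct_date
  exact pv_main date
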